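-- pv_equiv track=rewrite | github.com/OlhaBas/2024Python_lec_lab | Homework1/Task0.py | count_colums_no_zero
-- ===== SOURCE A (Python) =====
-- def count_colums_no_zero(matrix):
--     num_columns = len(matrix[0]) # Количество столбцов
--     count = 0
--
--     for col in range(num_columns):
--         has_zero = False
--         for row in range(len(matrix)):
--             if matrix[row][col] == 0:
--                 has_zero = True
--                 break
--         if not has_zero:
--             count += 1
--
--     return count
-- ===== SOURCE B (Python) =====
-- def count_colums_no_zero(matrix):
--     num_columns = len(matrix[0])
--     zero_cols = set()
--     for row in range(len(matrix)):
--         for col in range(num_columns):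
--             if matrix[row][col] == 0:
--                 zero_cols.add(col)
--     return num_columns - len(zero_cols)
-- ===== Notes on version B (the rewrite author's own statement) =====
-- stated objective: alternative
-- what changed: Column-major scan with an early-break per column is replaced by a single row-major pass that collects the set of zero-containing columns and returns num_columns minus the set's size.
-- outside the precondition, e.g. on count_colums_no_zero([[0, 0], [0]]): A returns 0, B raises IndexError
import Mathlib
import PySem

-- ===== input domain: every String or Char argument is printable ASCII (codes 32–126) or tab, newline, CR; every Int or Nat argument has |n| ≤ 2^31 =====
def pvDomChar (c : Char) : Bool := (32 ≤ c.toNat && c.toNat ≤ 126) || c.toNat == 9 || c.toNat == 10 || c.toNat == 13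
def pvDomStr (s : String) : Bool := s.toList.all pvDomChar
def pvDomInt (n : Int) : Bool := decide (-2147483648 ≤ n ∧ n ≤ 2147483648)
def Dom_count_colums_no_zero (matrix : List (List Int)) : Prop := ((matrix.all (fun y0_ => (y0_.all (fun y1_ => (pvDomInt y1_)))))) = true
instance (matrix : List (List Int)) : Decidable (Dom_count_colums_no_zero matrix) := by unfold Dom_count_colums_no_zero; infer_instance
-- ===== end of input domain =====

-- B replaces A's column-major scan (early break per column) by a single row-major
-- pass maintaining the set of zero-containing columns; same cost, different traversal.

-- ===== PORT A =====
-- Literal port of A: the inner row-loop with break computing has_zero is `any`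
-- over the row indices; out-of-range getD defaults are unreachable under Pre_.
def count_colums_no_zero (matrix : List (List Int)) : Int :=
  let num_columns := (matrix.getD 0 []).length
  (List.range num_columns).foldl (fun count col =>
    let has_zero := (List.range matrix.length).any
      (fun row => (matrix.getD row []).getD col 1 == 0)
    if !has_zero then count + 1 else count) 0

-- ===== PORT B =====
def count_colums_no_zero_alt (matrix : List (List Int)) : Int :=
  let num_columns := (matrix.getD 0 []).length
  let zero_cols : PySem.Set Int :=
    (List.range matrix.length).foldl (fun s row =>
      (List.range num_columns).foldl (fun s col =>
        if (matrix.getD row []).getD col 1 == 0 then PySem.Set.add s ((col : Nat) : Int) else s) s)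
      PySem.Set.empty
  (num_columns : Int) - PySem.Set.len zero_cols

-- ===== PRECONDITION & SPEC =====
-- Pre_ excludes the empty matrix (A raises IndexError on matrix[0]) and ragged
-- matrices with a row shorter than row 0, where both programs index past a row's
-- end: A raises unless every column shows a zero before the short row, and B
-- itself raises IndexError on any such input.
def Pre_count_colums_no_zero (matrix : List (List Int)) : Prop :=
  matrix ≠ [] ∧ ∀ row ∈ matrix, (matrix.getD 0 []).length ≤ row.length
instance (matrix : List (List Int)) : Decidable (Pre_count_colums_no_zero matrix) := by
  unfold Pre_count_colums_no_zero; infer_instance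
def pvWitness_count_colums_no_zero : List (List Int) := [[1, 0, 2], [3, 4, 5]]

def Spec_count_colums_no_zero (matrix : List (List Int)) (out : Int) : Prop := out = count_colums_no_zero_alt matrix
instance (matrix : List (List Int)) (out : Int) : Decidable (Spec_count_colums_no_zero matrix out) := by unfold Spec_count_colums_no_zero; infer_instance

-- ===== CLAIM (what is proved, stated in full; the proofs are below) =====
def Claim_equal_count_colums_no_zero : Prop := ∀ (matrix : List (List Int)), Dom_count_colums_no_zero matrix → Pre_count_colums_no_zero matrix → Spec_count_colums_no_zero matrix (count_colums_no_zero matrix)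

-- ===== LEMMAS AND PROOFS =====

-- A's counting fold equals the length of the filtered list.
theorem pv_foldl_count (l : List Nat) (p : Nat → Bool) (c : Int) :
    l.foldl (fun c col => if !p col then c + 1 else c) c
      = c + ((l.filter (fun col => !p col)).length : Int) := by
  induction l generalizing c with
  | nil => simp
  | cons x xs ih =>
    by_cases h : p x
    · simp only [List.foldl_cons, List.filter_cons, h, Bool.not_true]
      simpa using ih c
    · simp only [List.foldl_cons, List.filter_cons, h, Bool.not_false, if_true]
      rw [ih (c + 1)]
      simp only [List.length_cons]
      push_cast
      ring

-- conditional-add fold = Set.add folded over the filtered, mapped list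
theorem pv_foldl_cond_add (l : List Nat) (p : Nat → Bool) (s : PySem.Set Int) :
    l.foldl (fun s col => if p col then PySem.Set.add s ((col : Nat) : Int) else s) s
      = ((l.filter p).map (fun c : Nat => (c : Int))).foldl PySem.Set.add s := by
  induction l generalizing s with
  | nil => simp
  | cons x xs ih => by_cases h : p x <;> simp [h, ih]

-- B's double fold builds set() of the flattened list of zero-column indices
theorem pv_zero_cols_eq (matrix : List (List Int)) (num : Nat) :
    ((List.range matrix.length).foldl (fun s row =>
        (List.range num).foldl (fun s col =>
          if (matrix.getD row []).getD col 1 == 0 then PySem.Set.add s ((col : Nat) : Int) else s) s)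
      PySem.Set.empty : PySem.Set Int)
    = PySem.Set.ofList ((List.range matrix.length).flatMap (fun row =>
        (((List.range num).filter (fun col => (matrix.getD row []).getD col 1 == 0)).map
          (fun c : Nat => (c : Int))))) := by
  rw [PySem.Set.ofList_eq_foldl, List.foldl_flatMap]
  exact PySem.List.foldl_congr_mem _ _ _ _ (fun s row _ => pv_foldl_cond_add _ _ s)

-- membership in the flattened zero-column list ↔ an in-range column containing a zero
theorem pv_mem_big (matrix : List (List Int)) (num : Nat) (x : Int) :
    (x ∈ (List.range matrix.length).flatMap (fun row =>
        (((List.range num).filter (fun col => (matrix.getD row []).getD col 1 == 0)).map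
          (fun c : Nat => (c : Int)))))
    ↔ x ∈ ((List.range num).filter (fun col =>
        (List.range matrix.length).any (fun row => (matrix.getD row []).getD col 1 == 0))).map
          (fun c : Nat => (c : Int)) := by
  simp only [List.mem_flatMap, List.mem_map, List.mem_filter, List.mem_range, List.any_eq_true]
  constructor
  · rintro ⟨row, hrow, c, ⟨hc, hz⟩, rfl⟩
    exact ⟨c, ⟨hc, ⟨row, hrow, hz⟩⟩, rfl⟩
  · rintro ⟨c, ⟨hc, row, hrow, hz⟩, rfl⟩
    exact ⟨row, hrow, c, ⟨hc, hz⟩, rfl⟩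

-- the number of distinct zero columns = the number of in-range columns containing a zero
theorem pv_len_zero_cols (matrix : List (List Int)) (num : Nat) :
    (PySem.Set.ofList ((List.range matrix.length).flatMap (fun row =>
        (((List.range num).filter (fun col => (matrix.getD row []).getD col 1 == 0)).map
          (fun c : Nat => (c : Int)))))).length
    = ((List.range num).filter (fun col =>
        (List.range matrix.length).any (fun row => (matrix.getD row []).getD col 1 == 0))).length := by
  have hnodup : (((List.range num).filter (fun col =>
      (List.range matrix.length).any (fun row => (matrix.getD row []).getD col 1 == 0))).map
        (fun c : Nat => (c : Int))).Nodup := by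
    refine List.Nodup.map (fun a b h => ?_) (List.Nodup.filter _ (List.nodup_range))
    exact_mod_cast h
  have hmem : ∀ x : Int, x ∈ PySem.Set.ofList ((List.range matrix.length).flatMap (fun row =>
      (((List.range num).filter (fun col => (matrix.getD row []).getD col 1 == 0)).map
        (fun c : Nat => (c : Int)))))
      ↔ x ∈ ((List.range num).filter (fun col =>
        (List.range matrix.length).any (fun row => (matrix.getD row []).getD col 1 == 0))).map
          (fun c : Nat => (c : Int)) :=
    fun x => (PySem.Set.mem_ofList _ x).trans (pv_mem_big matrix num x)
  have hperm := (List.perm_ext_iff_of_nodup (PySem.Set.nodup_ofList _) hnodup).2 hmem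
  exact hperm.length_eq.trans (List.length_map ..)

theorem pv_filter_split (l : List Nat) (p : Nat → Bool) :
    (l.filter (fun c => !p c)).length + (l.filter p).length = l.length := by
  induction l with
  | nil => simp
  | cons x xs ih => by_cases h : p x <;> simp [h] <;> omega

-- ===== VERDICT (by name: the statement is the Claim_ definition above) =====
theorem count_colums_no_zero_spec : Claim_equal_count_colums_no_zero := by
  intro matrix _ _
  show count_colums_no_zero matrix = count_colums_no_zero_alt matrix
  unfold count_colums_no_zero count_colums_no_zero_alt
  simp only []
  rw [pv_zero_cols_eq matrix (matrix.getD 0 []).length]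
  set num := (matrix.getD 0 []).length with hnum
  set p : Nat → Bool := fun col =>
    (List.range matrix.length).any (fun row => (matrix.getD row []).getD col 1 == 0) with hp
  rw [pv_foldl_count (List.range num) p 0]
  have hlen := pv_len_zero_cols matrix num
  have hsplit := pv_filter_split (List.range num) p
  simp only [PySem.Set.len, ← hnum, ← hp, List.length_range] at *
  omega
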